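-- pv_equiv track=rewrite | github.com/RD-Tiz/python_scripts | random_stuff/Near-palindromes.py | sostituisci
-- ===== SOURCE A (Python) =====
-- def checker(parola):
--     x=parola[::-1]
--     if x==parola:
--         return(True)
--     else:
--         return(False)
--
-- def sostituisci(parola,alfa):
--     i=0
--     parole_sostituite=[]
--     while i<len(parola)//2:
--         nuova_parola=list(parola)
--         for l in alfa:
--             nuova_parola[i]=l
--             if checker(nuova_parola)==True:
--                 parole_sostituite.append("".join(nuova_parola))
--         i+=1
--     return parole_sostituite
-- ===== SOURCE B (Python) =====
-- def sostituisci(parola, alfa):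
--     # Change one first-half letter so the word becomes a palindrome.
--     # A word set at position i becomes a palindrome iff every other mirror
--     # pair already matches and the new letter equals its mirror character,
--     # so one pass collecting the mismatched mirror pairs decides everything.
--     n = len(parola)
--     mism = [i for i in range(n // 2) if parola[i] != parola[n - 1 - i]]
--     if len(mism) > 1:
--         return []
--     if len(mism) == 1:
--         k = mism[0]
--         c = parola[n - 1 - k]
--         w = list(parola)
--         w[k] = c
--         w = "".join(w)
--         return [w for l in alfa if l == c]
--     return [parola for i in range(n // 2) for l in alfa if l == parola[n - 1 - i]]
-- ===== Notes on version B (the rewrite author's own statement) =====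
-- stated objective: faster
-- what changed: Instead of substituting every alphabet letter at every first-half position and reversing the whole word each time, B collects the mismatched mirror pairs in one pass: a one-letter substitution yields a palindrome iff at most one pair mismatches and the new letter equals its mirror character, so only one (or every, if already a palindrome) position contributes.
import Mathlib
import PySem

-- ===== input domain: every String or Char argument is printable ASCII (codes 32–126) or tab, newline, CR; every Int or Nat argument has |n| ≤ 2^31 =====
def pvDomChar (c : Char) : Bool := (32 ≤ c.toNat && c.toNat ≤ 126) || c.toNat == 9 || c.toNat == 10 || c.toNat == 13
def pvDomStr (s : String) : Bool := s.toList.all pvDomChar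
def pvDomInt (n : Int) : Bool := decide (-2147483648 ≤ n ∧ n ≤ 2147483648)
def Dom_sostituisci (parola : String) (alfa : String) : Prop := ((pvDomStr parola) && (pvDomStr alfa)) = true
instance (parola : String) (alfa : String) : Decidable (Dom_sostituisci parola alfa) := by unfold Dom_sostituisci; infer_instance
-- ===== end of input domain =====

-- B replaces A's try-every-letter-and-reverse scan (O(n²·|alfa|)) by collecting the
-- mismatched mirror pairs once: a substitution yields a palindrome iff at most one
-- pair mismatches and the new letter equals its mirror character.

-- ===== PORT A =====
def checker (parola : List Char) : Bool :=
  let x := parola.reverse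
  if x == parola then true else false

-- Python's 'while i < len(parola)//2' loop, step for step
def sostLoopA (p : List Char) (alfa : List Char) (i : Nat) (acc : List String) : List String :=
  if i < p.length / 2 then
    sostLoopA p alfa (i + 1)
      (alfa.foldl
        (fun (st : List Char × List String) l =>
          let np := st.1.set i l
          if checker np = true then (np, st.2 ++ [String.ofList np]) else (np, st.2))
        (p, acc)).2
  else acc
termination_by p.length / 2 - i

def sostituisci (parola : String) (alfa : String) : List String :=
  sostLoopA parola.toList alfa.toList 0 []

-- ===== PORT B =====
def sostituisci_alt (parola : String) (alfa : String) : List String :=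
  let p := parola.toList
  let n := p.length
  let mism := (List.range (n / 2)).filter (fun i => !(p.getD i ' ' == p.getD (n - 1 - i) ' '))
  if mism.length > 1 then []
  else if mism.length == 1 then
    let k := mism.headD 0
    let c := p.getD (n - 1 - k) ' '
    let w := String.ofList (p.set k c)
    (alfa.toList.filter (fun l => l == c)).map (fun _ => w)
  else
    (List.range (n / 2)).flatMap
      (fun i => (alfa.toList.filter (fun l => l == p.getD (n - 1 - i) ' ')).map (fun _ => parola))

-- ===== PRECONDITION & SPEC =====
def Spec_sostituisci (parola : String) (alfa : String) (out : List String) : Prop := out = sostituisci_alt parola alfa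
instance (parola : String) (alfa : String) (out : List String) : Decidable (Spec_sostituisci parola alfa out) := by unfold Spec_sostituisci; infer_instance

-- ===== CLAIM (what is proved, stated in full; the proofs are below) =====
def Claim_equal_sostituisci : Prop := ∀ (parola : String) (alfa : String), Dom_sostituisci parola alfa → Spec_sostituisci parola alfa (sostituisci parola alfa)

-- ===== LEMMAS AND PROOFS =====

-- contribution of one position i of A's outer loop
def gA (p : List Char) (alfa : List Char) (i : Nat) : List String :=
  alfa.filterMap (fun l =>
    if checker (p.set i l) = true then some (String.ofList (p.set i l)) else none)

lemma inner_eq (p : List Char) (i : Nat) (alfa : List Char) (s : List Char) (acc : List String)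
    (hs : ∀ l, s.set i l = p.set i l) :
    (alfa.foldl
        (fun (st : List Char × List String) l =>
          let np := st.1.set i l
          if checker np = true then (np, st.2 ++ [String.ofList np]) else (np, st.2))
        (s, acc)).2 = acc ++ gA p alfa i := by
  induction alfa generalizing s acc with
  | nil => simp [gA]
  | cons l t ih =>
    simp only [List.foldl_cons, hs l]
    by_cases h : checker (p.set i l) = true
    · simp only [h, if_pos]
      rw [ih (p.set i l) _ (fun l' => List.set_set l)]
      simp [gA, h]
    · simp only [h, if_neg, Bool.false_eq_true, not_false_iff]
      rw [ih (p.set i l) _ (fun l' => List.set_set l)]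
      simp [gA, h]

lemma loopA_eq (p : List Char) (alfa : List Char) :
    ∀ (k i : Nat) (acc : List String), p.length / 2 - i = k →
      sostLoopA p alfa i acc = acc ++ (List.range' i k).flatMap (gA p alfa) := by
  intro k
  induction k with
  | zero =>
    intro i acc h
    rw [sostLoopA, if_neg (by omega)]
    simp
  | succ k ih =>
    intro i acc h
    rw [sostLoopA, if_pos (by omega)]
    rw [inner_eq p i alfa p acc (fun l => rfl)]
    rw [ih (i + 1) _ (by omega)]
    rw [List.range'_succ]
    simp [List.append_assoc]

lemma pal_iff (q : List Char) :
    q.reverse = q ↔ ∀ j < q.length / 2, q.getD j ' ' = q.getD (q.length - 1 - j) ' ' := by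
  constructor
  · intro h j hj
    have hlen : j < q.length := by omega
    have hm : q.length - 1 - j < q.length := by omega
    have h2 := congrArg (fun l : List Char => l[j]?) h
    simp only [List.getElem?_reverse hlen] at h2
    rw [List.getD_eq_getElem q ' ' hlen, List.getD_eq_getElem q ' ' hm]
    rw [List.getElem?_eq_getElem hlen, List.getElem?_eq_getElem hm] at h2
    exact (Option.some_injective _ h2).symm
  · intro h
    apply List.ext_getElem (by simp)
    intro j hj1 hj2
    rw [List.getElem_reverse]
    by_cases hcase : j < q.length / 2
    · have := h j hcase
      rw [List.getD_eq_getElem q ' ' (by omega), List.getD_eq_getElem q ' ' (by omega)] at this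
      exact this.symm
    · by_cases hmid : q.length - 1 - j = j
      · simp [hmid]
      · have hj' : q.length - 1 - j < q.length / 2 := by omega
        have := h _ hj'
        rw [List.getD_eq_getElem q ' ' (by omega), List.getD_eq_getElem q ' ' (by omega)] at this
        have hidx : q.length - 1 - (q.length - 1 - j) = j := by omega
        simp only [hidx] at this
        exact this

lemma checker_set (p : List Char) (i : Nat) (l : Char) (hi : i < p.length / 2) :
    checker (p.set i l) = true ↔
      (l = p.getD (p.length - 1 - i) ' ' ∧
        ∀ j < p.length / 2, j ≠ i → p.getD j ' ' = p.getD (p.length - 1 - j) ' ') := by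
  have hchk : checker (p.set i l) = true ↔ (p.set i l).reverse = p.set i l := by
    simp [checker]
  have hne : i ≠ p.length - 1 - i := by omega
  have hset : ∀ j, j < p.length → (p.set i l).getD j ' ' = if i = j then l else p.getD j ' ' := by
    intro j hj
    rw [List.getD_eq_getElem _ ' ' (by simpa using hj), List.getElem_set]
    split
    · rfl
    · rw [List.getD_eq_getElem p ' ' hj]
  rw [hchk, pal_iff]
  simp only [List.length_set]
  constructor
  · intro h
    refine ⟨?_, ?_⟩
    · have := h i hi
      rw [hset i (by omega), hset (p.length - 1 - i) (by omega)] at this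
      rw [if_pos rfl, if_neg hne] at this
      exact this
    · intro j hj hji
      have := h j hj
      rw [hset j (by omega), hset (p.length - 1 - j) (by omega)] at this
      rw [if_neg (fun e => hji e.symm), if_neg (by omega)] at this
      exact this
  · rintro ⟨hl, hrest⟩ j hj
    rw [hset j (by omega), hset (p.length - 1 - j) (by omega)]
    by_cases hji : j = i
    · subst hji
      rw [if_pos rfl, if_neg hne]
      exact hl
    · rw [if_neg (fun e => hji e.symm), if_neg (by omega)]
      exact hrest j hj hji

lemma gA_of_ok (p : List Char) (alfa : List Char) (i : Nat) (c : Char) (hi : i < p.length / 2)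
    (hok : ∀ j < p.length / 2, j ≠ i → p.getD j ' ' = p.getD (p.length - 1 - j) ' ')
    (hc : c = p.getD (p.length - 1 - i) ' ') :
    gA p alfa i = (alfa.filter (fun l => l == c)).map (fun _ => String.ofList (p.set i c)) := by
  induction alfa with
  | nil => simp [gA]
  | cons l t ih =>
    by_cases h : l = c
    · subst h
      have hck : checker (p.set i l) = true := (checker_set p i l hi).2 ⟨hc, hok⟩
      simp [gA, hck]
      rw [← gA, ih]
      simp
    · have hck : ¬ checker (p.set i l) = true :=
        fun hk => h (((checker_set p i l hi).1 hk).1.trans hc.symm)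
      simp [gA, hck, h]
      rw [← gA, ih]
      simp

lemma gA_of_bad (p : List Char) (alfa : List Char) (i : Nat) (hi : i < p.length / 2)
    (j : Nat) (hj : j < p.length / 2) (hji : j ≠ i)
    (hmis : p.getD j ' ' ≠ p.getD (p.length - 1 - j) ' ') :
    gA p alfa i = [] := by
  rw [gA, List.filterMap_eq_nil_iff]
  intro l _
  have hc : ¬ checker (p.set i l) = true :=
    fun hc => hmis (((checker_set p i l hi).1 hc).2 j hj hji)
  simp [hc]

lemma flatMap_single {α : Type} (f : Nat → List α) (m k : Nat) (hk : k < m)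
    (h : ∀ i < m, i ≠ k → f i = []) : (List.range m).flatMap f = f k := by
  induction m with
  | zero => omega
  | succ m ih =>
    rw [List.range_succ, List.flatMap_append]
    by_cases hkm : k = m
    · subst hkm
      have hz : (List.range k).flatMap f = [] :=
        List.flatMap_eq_nil_iff.2 (fun i hi => h i (by simp at hi; omega) (by simp at hi; omega))
      simp [hz]
    · simp only [List.flatMap_cons, List.flatMap_nil, List.append_nil]
      rw [h m (by omega) (fun e => hkm e.symm), List.append_nil]
      exact ih (by omega) (fun i hi hik => h i (by omega) hik)

theorem sostituisci_spec : Claim_equal_sostituisci := by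
  intro parola alfa _
  unfold Spec_sostituisci
  have hA : sostituisci parola alfa
      = (List.range (parola.toList.length / 2)).flatMap (gA parola.toList alfa.toList) := by
    rw [sostituisci, loopA_eq parola.toList alfa.toList (parola.toList.length / 2) 0 [] (by omega)]
    rw [List.range_eq_range']
    simp
  rw [hA, sostituisci_alt]
  simp only []
  set p := parola.toList with hp
  set n := p.length with hn
  have hmem : ∀ j, (j ∈ (List.range (n / 2)).filter
      (fun i => !(p.getD i ' ' == p.getD (n - 1 - i) ' '))) ↔
      (j < n / 2 ∧ p.getD j ' ' ≠ p.getD (n - 1 - j) ' ') := by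
    intro j
    simp [List.mem_filter, List.mem_range]
  have hparola : String.ofList p = parola := by rw [hp]; simp
  cases hm : (List.range (n / 2)).filter
      (fun i => !(p.getD i ' ' == p.getD (n - 1 - i) ' ')) with
  | nil =>
    simp only [List.length_nil]
    rw [if_neg (by omega), if_neg (by decide)]
    rw [hm] at hmem
    have hok : ∀ j < n / 2, p.getD j ' ' = p.getD (n - 1 - j) ' ' := by
      intro j hj
      by_contra hne
      exact absurd ((hmem j).2 ⟨hj, hne⟩) (List.not_mem_nil)
    have hfun : ∀ i ∈ List.range (n / 2), gA p alfa.toList i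
        = (alfa.toList.filter (fun l => l == p.getD (n - 1 - i) ' ')).map (fun _ => parola) := by
      intro i hi'
      rw [List.mem_range] at hi'
      rw [gA_of_ok p alfa.toList i (p.getD (n - 1 - i) ' ') hi' (fun j hj _ => hok j hj) rfl]
      have hself : p.set i (p.getD (n - 1 - i) ' ') = p := by
        rw [← hok i hi', List.getD_eq_getElem p ' ' (by omega)]
        exact List.set_getElem_self _
      rw [hself, hparola]
    have := congrArg List.flatten (List.map_congr_left hfun)
    simpa [List.flatMap_def] using this
  | cons k rest =>
    cases rest with
    | nil =>
      simp only [List.length_cons, List.length_nil]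
      rw [if_neg (by omega), if_pos (by decide)]
      rw [hm] at hmem
      have hk := (hmem k).1 (by simp)
      have hok : ∀ j < n / 2, j ≠ k → p.getD j ' ' = p.getD (n - 1 - j) ' ' := by
        intro j hj hjk
        by_contra hne
        have hmk := (hmem j).2 ⟨hj, hne⟩
        simp at hmk
        exact hjk hmk
      simp only [List.headD_cons]
      rw [flatMap_single (gA p alfa.toList) (n / 2) k hk.1
        (fun i hi hik => gA_of_bad p alfa.toList i hi k hk.1 (fun e => hik e.symm) hk.2)]
      rw [gA_of_ok p alfa.toList k (p.getD (n - 1 - k) ' ') hk.1 hok rfl]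
    | cons b rest2 =>
      simp only [List.length_cons]
      rw [if_pos (by omega)]
      rw [hm] at hmem
      have nd : (k :: b :: rest2).Nodup := hm ▸ List.filter_sublist.nodup List.nodup_range
      have hkb : k ≠ b := by
        simp only [List.nodup_cons, List.mem_cons] at nd
        exact fun e => nd.1 (Or.inl e)
      have hk := (hmem k).1 (by simp)
      have hb := (hmem b).1 (by simp)
      refine List.flatMap_eq_nil_iff.2 ?_
      intro i hi'
      rw [List.mem_range] at hi'
      by_cases hik : i = k
      · subst hik
        exact gA_of_bad p alfa.toList i hi' b hb.1 (fun e => hkb e.symm) hb.2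
      · exact gA_of_bad p alfa.toList i hi' k hk.1 (fun e => hik e.symm) hk.2
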